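-- pv_equiv track=rewrite | github.com/Keruiiia/CW | Python/6 kuy/6 kuy English beggars.py | beggars
-- ===== SOURCE A (Python) =====
-- def beggars(values, n):
--     if n > len(values):
--         values.extend([0] * (n - len(values)))
--         return values
--     elif n == 0:
--         return []
--     else:
--         return [sum(values[j] for j in range(i, len(values), n)) for i in range(n)]
-- ===== SOURCE B (Python) =====
-- def beggars(values, n):
--     if n > len(values):
--         values.extend([0] * (n - len(values)))
--         return values
--     if n <= 0:
--         return []
--     result = [0] * n
--     for idx, v in enumerate(values):
--         result[idx % n] += v
--     return result
-- ===== Notes on version B (the rewrite author's own statement) =====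
-- stated objective: alternative
-- what changed: replaces the per-beggar strided-sum comprehension (one generator with its own range scan per beggar) with a single scatter pass over the values that adds each value into bucket idx % n of a preallocated result list
import Mathlib
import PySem

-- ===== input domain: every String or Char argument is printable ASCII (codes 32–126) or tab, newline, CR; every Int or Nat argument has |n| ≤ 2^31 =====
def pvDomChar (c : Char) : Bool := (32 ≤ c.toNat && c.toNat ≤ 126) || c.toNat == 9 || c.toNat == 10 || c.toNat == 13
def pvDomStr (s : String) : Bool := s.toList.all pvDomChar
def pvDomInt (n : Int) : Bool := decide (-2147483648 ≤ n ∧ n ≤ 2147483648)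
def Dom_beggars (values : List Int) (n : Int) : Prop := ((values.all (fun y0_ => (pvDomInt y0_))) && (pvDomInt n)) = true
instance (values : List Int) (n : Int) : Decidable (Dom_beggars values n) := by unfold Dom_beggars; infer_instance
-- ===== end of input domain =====

-- B replaces the per-beggar strided-sum comprehension with one scatter pass over the values
-- (result[idx % n] += v); equivalence is about the RETURN value only — A (and B) mutate the
-- argument list in the n > len(values) branch.


-- ===== PORT A =====
def beggars (values : List Int) (n : Int) : List Int :=
  if n > (values.length : Int) then
    values ++ List.replicate (n - (values.length : Int)).toNat 0
  else if n = 0 then []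
  else
    (PySem.List.pyRange 0 n 1).map (fun i =>
      ((PySem.List.pyRange i (values.length : Int) n).map
        (fun j => PySem.List.pyGetD values j 0)).sum)

-- ===== PORT B =====
-- the scatter loop: 'for idx, v in enumerate(values): result[idx % n] += v'
def scatterLoop (n : Int) (pairs : List (Int × Int)) (result : List Int) : List Int :=
  pairs.foldl (fun res p =>
    res.set (PySem.Int.mod p.1 n).toNat (res.getD (PySem.Int.mod p.1 n).toNat 0 + p.2)) result

def beggars_alt (values : List Int) (n : Int) : List Int :=
  if n > (values.length : Int) then
    values ++ List.replicate (n - (values.length : Int)).toNat 0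
  else if n ≤ 0 then []
  else scatterLoop n (PySem.List.enumerate values 0) (List.replicate n.toNat 0)

-- ===== PRECONDITION & SPEC =====
def Spec_beggars (values : List Int) (n : Int) (out : List Int) : Prop := out = beggars_alt values n
instance (values : List Int) (n : Int) (out : List Int) : Decidable (Spec_beggars values n out) := by unfold Spec_beggars; infer_instance

-- ===== CLAIM (what is proved, stated in full; the proofs are below) =====
def Claim_equal_beggars : Prop := ∀ (values : List Int) (n : Int), Dom_beggars values n → Spec_beggars values n (beggars values n)

-- ===== LEMMAS AND PROOFS =====

-- the common value: sum of the values at positions ≡ t (mod m)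
def stride (values : List Int) (m t : Nat) : Int :=
  (((List.range values.length).filter (fun j => j % m == t)).map
    (fun j => values.getD j 0)).sum

lemma scatterLoop_length (n : Int) (ps : List (Int × Int)) (res : List Int) :
    (scatterLoop n ps res).length = res.length := by
  induction ps generalizing res with
  | nil => rfl
  | cons p t ih => simp [scatterLoop, List.foldl_cons] at ih ⊢; rw [ih]; simp

lemma scatterLoop_getD (n : Int) (hn : 0 < n) (values : List Int) :
    ∀ (s : Int) (res : List Int), res.length = n.toNat → ∀ (t : Nat), t < n.toNat →
    (scatterLoop n (PySem.List.enumerate values s) res).getD t 0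
      = res.getD t 0 +
        (((PySem.List.enumerate values s).filter
            (fun p => (PySem.Int.mod p.1 n).toNat == t)).map (·.2)).sum := by
  induction values with
  | nil => intro s res _ t _; simp [scatterLoop, PySem.List.enumerate_nil]
  | cons v rest ih =>
    intro s res hres t ht
    rw [PySem.List.enumerate_cons]
    simp only [scatterLoop, List.foldl_cons, List.filter_cons]
    have hk0lt : (PySem.Int.mod s n).toNat < n.toNat := by
      have h1 := PySem.Int.mod_nonneg s hn
      have h2 := PySem.Int.mod_lt s hn
      omega
    have hres' : (res.set (PySem.Int.mod s n).toNat
        (res.getD (PySem.Int.mod s n).toNat 0 + v)).length = n.toNat := by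
      simp [hres]
    have hmain := ih (s + 1) (res.set (PySem.Int.mod s n).toNat
        (res.getD (PySem.Int.mod s n).toNat 0 + v)) hres' t ht
    simp only [scatterLoop] at hmain
    rw [hmain]
    by_cases hkt : (PySem.Int.mod s n).toNat = t
    · have hset : (res.set (PySem.Int.mod s n).toNat
          (res.getD (PySem.Int.mod s n).toNat 0 + v)).getD t 0
          = res.getD t 0 + v := by
        rw [hkt]
        simp [List.getD_eq_getElem?_getD, hres, ht]
      have hb : ((PySem.Int.mod (s, v).1 n).toNat == t) = true := by
        simp [hkt]
      rw [hset, hb]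
      simp only [if_true, List.map_cons, List.sum_cons]
      ring
    · have hb : ((PySem.Int.mod (s, v).1 n).toNat == t) = false := by
        simp [hkt]
      have hset : (res.set (PySem.Int.mod s n).toNat
          (res.getD (PySem.Int.mod s n).toNat 0 + v)).getD t 0
          = res.getD t 0 := by
        simp [List.getD_eq_getElem?_getD, hkt]
      rw [hb, hset]
      simp only [Bool.false_eq_true, if_false]

lemma pyRange_stride_eq_filter (L m i : Nat) (hm : 0 < m) (hi : i < m) :
    PySem.List.pyRange (i : Int) (L : Int) (m : Int)
      = ((List.range L).filter (fun j => j % m == i)).map (Nat.cast : Nat → Int) := by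
  have hms : (0 : Int) < (m : Int) := by exact_mod_cast hm
  have hp1 : (PySem.List.pyRange (i : Int) (L : Int) (m : Int)).Pairwise (· < ·) := by
    rw [PySem.List.pyRange_of_pos _ _ hms, List.pairwise_map]
    exact List.pairwise_lt_range.imp (fun {a b} h => by
      have hc : ((a : Int)) < (b : Int) := by exact_mod_cast h
      nlinarith)
  have hp2 : ((((List.range L).filter (fun j => j % m == i)).map
      (Nat.cast : Nat → Int))).Pairwise (· < ·) := by
    rw [List.pairwise_map]
    exact (List.pairwise_lt_range.filter _).imp (fun {a b} h => by exact_mod_cast h)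
  have hmem : ∀ x : Int, x ∈ PySem.List.pyRange (i : Int) (L : Int) (m : Int) ↔
      x ∈ ((List.range L).filter (fun j => j % m == i)).map (Nat.cast : Nat → Int) := by
    intro x
    rw [PySem.List.mem_pyRange_iff_of_pos hms]
    simp only [List.mem_map, List.mem_filter, List.mem_range, beq_iff_eq]
    constructor
    · rintro ⟨h1, h2, c, hc⟩
      refine ⟨x.toNat, ⟨by omega, ?_⟩, by omega⟩
      have hxc : (x.toNat : Int) = (i : Int) + (m : Int) * c := by omega
      have hmm : ((x.toNat % m : Nat) : Int) = ((i : Nat) : Int) := by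
        push_cast
        rw [hxc, Int.add_mul_emod_self_left]
        exact Int.emod_eq_of_lt (by omega) (by exact_mod_cast hi)
      exact_mod_cast hmm
    · rintro ⟨j, ⟨hj, hji⟩, rfl⟩
      have hmod := Nat.div_add_mod j m
      refine ⟨by omega, by exact_mod_cast hj, ⟨((j / m : Nat) : Int), ?_⟩⟩
      have hnat : j - i = m * (j / m) := by omega
      have hc : ((j : Int)) - (i : Int) = ((j - i : Nat) : Int) := by omega
      rw [hc, hnat, Nat.cast_mul]
  have hnd1 : (PySem.List.pyRange (i : Int) (L : Int) (m : Int)).Nodup :=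
    hp1.imp (fun h => ne_of_lt h)
  have hnd2 : ((((List.range L).filter (fun j => j % m == i)).map
      (Nat.cast : Nat → Int))).Nodup :=
    hp2.imp (fun h => ne_of_lt h)
  have hperm := (List.perm_ext_iff_of_nodup hnd1 hnd2).mpr hmem
  calc PySem.List.pyRange (i : Int) (L : Int) (m : Int)
      = PySem.List.sorted (PySem.List.pyRange (i : Int) (L : Int) (m : Int)) (fun x => x) := by
        rw [PySem.List.sorted_eq_of_perm_of_pairwise_lt _ _ _ (List.Perm.refl _) hp1]
    _ = _ := PySem.List.sorted_eq_of_perm_of_pairwise_lt _ _ _ hperm.symm hp2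

lemma beggars_entry (values : List Int) (n : Int) (hn : 0 < n) (i : Nat) (hi : i < n.toNat) :
    ((PySem.List.pyRange (i : Int) (values.length : Int) n).map
      (fun j => PySem.List.pyGetD values j 0)).sum = stride values n.toNat i := by
  have hcast : ((n.toNat : Int)) = n := by omega
  rw [← hcast, pyRange_stride_eq_filter values.length n.toNat i (by omega) hi,
      List.map_map, stride]
  congr 1
  apply List.map_congr_left
  intro j _
  simp [PySem.List.pyGetD_natCast]

lemma beggars_alt_entry (values : List Int) (n : Int) (hn : 0 < n) (t : Nat) (ht : t < n.toNat) :
    (scatterLoop n (PySem.List.enumerate values 0) (List.replicate n.toNat 0)).getD t 0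
      = stride values n.toNat t := by
  rw [scatterLoop_getD n hn values 0 (List.replicate n.toNat 0) (by simp) t ht]
  rw [List.getD_eq_getElem _ _ (by simpa using ht), List.getElem_replicate]
  rw [PySem.List.enumerate_eq_map_pyRange values 0, List.filter_map, List.map_map]
  have hL : PySem.List.len values = (values.length : Int) := by
    simp [PySem.List.len_eq]
  rw [hL, PySem.List.pyRange_zero_nat values.length, List.filter_map, List.map_map]
  rw [stride, zero_add]
  have hcast : ((n.toNat : Int)) = n := by omega
  simp only [Function.comp_def]
  have h1 : List.filter (fun x : Nat => (PySem.Int.mod (x : Int) n).toNat == t)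
        (List.range values.length)
      = List.filter (fun j : Nat => j % n.toNat == t) (List.range values.length) :=
    List.filter_congr (fun j _ => by
      have hm : PySem.Int.mod (j : Int) n = ((j % n.toNat : Nat) : Int) := by
        rw [← hcast]; exact PySem.Int.mod_natCast j n.toNat
      rw [hm, Int.toNat_natCast])
  have h2 : List.map (fun x : Nat => PySem.List.pyGetD values (x : Int) 0)
        (List.filter (fun j : Nat => j % n.toNat == t) (List.range values.length))
      = List.map (fun j : Nat => values.getD j 0)
        (List.filter (fun j : Nat => j % n.toNat == t) (List.range values.length)) :=
    List.map_congr_left (fun j _ => PySem.List.pyGetD_natCast values j 0)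
  rw [h1, h2]

-- ===== VERDICT (by name: the statement is the Claim_ definition above) =====
theorem beggars_spec : Claim_equal_beggars := by
  intro values n _
  unfold Spec_beggars beggars beggars_alt
  by_cases hgt : n > (values.length : Int)
  · simp [hgt]
  · simp only [if_neg hgt]
    by_cases hle : n ≤ 0
    · have h0 : ¬ n = 0 ∨ n = 0 := by omega
      rcases h0 with h | h
      · simp [hle, h, PySem.List.pyRange_one_eq_nil hle]
      · simp [h]
    · have hn : 0 < n := by omega
      simp only [if_neg (by omega : ¬ n = 0), if_neg hle]
      apply List.ext_getElem
      · simp [scatterLoop_length, PySem.List.length_pyRange_one]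
      · intro k h1 h2
        have hk : k < n.toNat := by
          simpa [scatterLoop_length] using h2
        have hA : (PySem.List.pyRange 0 n 1)[k]'(by simpa [PySem.List.length_pyRange_one] using (by omega : k < (n - 0).toNat)) = (k : Int) := by
          rw [PySem.List.getElem_pyRange_one]; ring
        rw [List.getElem_map]
        rw [hA]
        have hB := beggars_alt_entry values n hn k hk
        have hlen : (scatterLoop n (PySem.List.enumerate values 0) (List.replicate n.toNat 0)).length = n.toNat := by
          simp [scatterLoop_length]
        rw [List.getD_eq_getElem _ _ (by omega)] at hB
        rw [hB]
        exact beggars_entry values n hn k hk
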